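-- pv_equiv track=rewrite | github.com/kaikozlov/zed | bracket-utils/strategy_sweep.py | outside_in_order
-- ===== SOURCE A (Python) =====
-- def outside_in_order(length: int) -> tuple[int, ...]:
--     order = [0]
--     left = 1
--     right = length - 1
--     while left <= right:
--         order.append(right)
--         if left != right:
--             order.append(left)
--         left += 1
--         right -= 1
--     return tuple(order)
-- ===== SOURCE B (Python) =====
-- def outside_in_order(length: int) -> tuple[int, ...]:
--     order = [0]
--     for p in range(1, length):
--         if p % 2 == 1:
--             order.append(length - (p + 1) // 2)
--         else:
--             order.append(p // 2)
--     return tuple(order)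
-- ===== Notes on version B (the rewrite author's own statement) =====
-- stated objective: alternative
-- what changed: Replaces the stateful converging two-pointer while-loop (which appends one or two elements per iteration) with a single stateless pass over range(1, length) that computes each element directly from its position parity.
import Mathlib
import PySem

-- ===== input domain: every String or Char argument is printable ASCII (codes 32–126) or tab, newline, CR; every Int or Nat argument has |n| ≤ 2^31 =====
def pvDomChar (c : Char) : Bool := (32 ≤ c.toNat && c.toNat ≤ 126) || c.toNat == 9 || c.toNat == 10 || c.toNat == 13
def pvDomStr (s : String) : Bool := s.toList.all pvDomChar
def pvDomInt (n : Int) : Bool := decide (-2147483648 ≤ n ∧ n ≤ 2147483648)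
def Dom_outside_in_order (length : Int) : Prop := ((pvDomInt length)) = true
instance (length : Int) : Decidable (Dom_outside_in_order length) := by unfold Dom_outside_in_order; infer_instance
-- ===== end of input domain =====

-- B replaces A's stateful two-pointer while-loop by a single stateless pass computing
-- each element from its position parity (objective: alternative decomposition, same cost).

-- ===== PORT A =====
-- the while-loop of A, emitting right (and left when distinct) each iteration
def pvLoopA (left right : Int) : List Int :=
  if left ≤ right then
    (right :: (if left ≠ right then [left] else [])) ++ pvLoopA (left + 1) (right - 1)
  else []
termination_by (right + 1 - left).toNat
decreasing_by omega

def outside_in_order (length : Int) : List Int :=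
  0 :: pvLoopA 1 (length - 1)

-- ===== PORT B =====
def outside_in_order_alt (length : Int) : List Int :=
  0 :: (PySem.List.pyRange 1 length 1).map (fun p =>
    if PySem.Int.mod p 2 = 1 then length - PySem.Int.floordiv (p + 1) 2
    else PySem.Int.floordiv p 2)

-- ===== PRECONDITION & SPEC =====
def Spec_outside_in_order (length : Int) (out : List Int) : Prop := out = outside_in_order_alt length
instance (length : Int) (out : List Int) : Decidable (Spec_outside_in_order length out) := by unfold Spec_outside_in_order; infer_instance

-- ===== CLAIM (what is proved, stated in full; the proofs are below) =====
def Claim_equal_outside_in_order : Prop := ∀ (length : Int), Dom_outside_in_order length → Spec_outside_in_order length (outside_in_order length)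

-- ===== LEMMAS AND PROOFS =====

-- Invariant: with left + right = length, the rest of A's loop equals B's map over range(2*left-1, length).
theorem pvLoopA_eq (length : Int) :
    ∀ (n : Nat) (left : Int), 1 ≤ left → n = (length + 1 - 2 * left).toNat →
      pvLoopA left (length - left) =
        (PySem.List.pyRange (2 * left - 1) length 1).map (fun p =>
          if PySem.Int.mod p 2 = 1 then length - PySem.Int.floordiv (p + 1) 2
          else PySem.Int.floordiv p 2) := by
  intro n
  induction n using Nat.strong_induction_on with
  | _ n ih =>
    intro left hl hn
    rw [pvLoopA]
    by_cases hle : left ≤ length - left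
    · rw [if_pos hle]
      have h1 : 2 * left - 1 < length := by omega
      rw [PySem.List.pyRange_one_cons h1, List.map_cons]
      have hodd : PySem.Int.mod (2 * left - 1) 2 = 1 := by
        rw [PySem.Int.mod_eq_emod_of_pos (by omega)]; omega
      have hfd1 : PySem.Int.floordiv (2 * left - 1 + 1) 2 = left := by
        rw [PySem.Int.floordiv_eq_ediv_of_pos (by omega)]; omega
      by_cases heq : left = length - left
      · rw [if_neg (by omega : ¬ left ≠ length - left)]
        have h2 : length ≤ 2 * left - 1 + 1 := by omega
        rw [PySem.List.pyRange_one_eq_nil (by omega : length ≤ 2 * left - 1 + 1)]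
        have : pvLoopA (left + 1) (length - left - 1) = [] := by
          rw [pvLoopA]; rw [if_neg (by omega)]
        rw [if_pos hodd, hfd1]
        simp [this]
      · rw [if_pos (by omega : left ≠ length - left)]
        have h2 : 2 * left < length := by omega
        rw [PySem.List.pyRange_one_cons (by omega : 2 * left - 1 + 1 < length), List.map_cons]
        have heven : ¬ PySem.Int.mod (2 * left - 1 + 1) 2 = 1 := by
          rw [PySem.Int.mod_eq_emod_of_pos (by omega)]; omega
        have hfd2 : PySem.Int.floordiv (2 * left - 1 + 1) 2 = left := hfd1
        have hrec : pvLoopA (left + 1) (length - (left + 1)) =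
            (PySem.List.pyRange (2 * (left + 1) - 1) length 1).map (fun p =>
              if PySem.Int.mod p 2 = 1 then length - PySem.Int.floordiv (p + 1) 2
              else PySem.Int.floordiv p 2) := by
          exact ih (length + 1 - 2 * (left + 1)).toNat (by omega) (left + 1) (by omega) rfl
        have harg : length - left - 1 = length - (left + 1) := by omega
        rw [harg, hrec, if_pos hodd, hfd1, if_neg heven,
            show (2:Int) * left - 1 + 1 + 1 = 2 * (left + 1) - 1 by omega]
        simp
    · rw [if_neg hle, PySem.List.pyRange_one_eq_nil (by omega : length ≤ 2 * left - 1)]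
      simp

-- ===== VERDICT (by name: the statement is the Claim_ definition above) =====
theorem outside_in_order_spec : Claim_equal_outside_in_order := by
  intro length _
  unfold Spec_outside_in_order outside_in_order outside_in_order_alt
  have := pvLoopA_eq length (length + 1 - 2 * 1).toNat 1 (by omega) rfl
  rw [show (2:Int) * 1 - 1 = 1 by omega] at this
  exact congrArg (0 :: ·) this
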